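-- pv_equiv track=rewrite | github.com/erenisci/algorithm-solutions | LeetCode/Python/1304_Find_N_Unique_Integers_Sum_up_to_Zero.py | sumZero
-- ===== SOURCE A (Python) =====
-- def sumZero(n: int) -> list[int]:
--     liste = []
--     if n % 2 != 0:
--         for i in range(0 - n // 2, 1 + n // 2):
--             liste.append(i)
--         return liste
--     else:
--         if n == 0:
--             return [0]
--         for i in range(1 - n, 1 + n, 2):
--             liste.append(i)
--         return liste
-- ===== SOURCE B (Python) =====
-- def _seq(start, cnt, step):
--     # divide and conquer: arithmetic sequence of cnt terms by recursive halving
--     if cnt <= 0: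
--         return []
--     if cnt == 1:
--         return [start]
--     half = cnt // 2
--     return _seq(start, half, step) + _seq(start + half * step, cnt - half, step)
--
-- def sumZero(n: int) -> list[int]:
--     if n == 0:
--         return [0]
--     if n % 2:
--         start, stop, step = -(n // 2), 1 + n // 2, 1
--     else:
--         start, stop, step = 1 - n, 1 + n, 2
--     cnt = max(0, (stop - start + step - 1) // step)
--     return _seq(start, cnt, step)
-- ===== Notes on version B (the rewrite author's own statement) =====
-- stated objective: alternative
-- what changed: B computes the sequence parameters (start, stop, step) arithmetically and then materialises the arithmetic sequence by a divide-and-conquer generator that recursively halves the count and concatenates the two halves, instead of A's single iterative left-to-right range loop with per-element append.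
import Mathlib
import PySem

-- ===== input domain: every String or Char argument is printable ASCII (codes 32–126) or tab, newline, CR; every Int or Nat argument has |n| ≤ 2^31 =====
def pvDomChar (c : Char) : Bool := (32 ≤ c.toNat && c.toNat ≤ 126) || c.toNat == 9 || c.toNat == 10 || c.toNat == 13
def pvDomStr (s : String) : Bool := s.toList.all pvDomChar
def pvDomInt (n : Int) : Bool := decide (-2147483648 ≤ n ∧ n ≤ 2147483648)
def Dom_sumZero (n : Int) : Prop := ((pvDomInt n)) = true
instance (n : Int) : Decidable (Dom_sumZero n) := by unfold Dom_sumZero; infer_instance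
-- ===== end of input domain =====

-- B computes (start, stop, step) arithmetically and materialises the arithmetic sequence by a
-- divide-and-conquer generator (recursive halving + concatenation) instead of A's single
-- left-to-right range loop; same asymptotic cost, different decomposition.

-- ===== PORT A =====
def sumZero (n : Int) : List Int :=
  let liste : List Int := []
  if PySem.Int.mod n 2 ≠ 0 then
    (PySem.List.pyRange (0 - PySem.Int.floordiv n 2) (1 + PySem.Int.floordiv n 2) 1).foldl
      (fun acc i => acc ++ [i]) liste
  else if n = 0 then [0]
  else
    (PySem.List.pyRange (1 - n) (1 + n) 2).foldl (fun acc i => acc ++ [i]) liste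

-- ===== PORT B =====
-- divide-and-conquer arithmetic-sequence generator (_seq in Source B); cnt ≤ 0 is the Nat 0 case
def seqDC (start : Int) (cnt : Nat) (step : Int) : List Int :=
  if cnt = 0 then []
  else if cnt = 1 then [start]
  else seqDC start (cnt / 2) step ++ seqDC (start + (cnt / 2 : Nat) * step) (cnt - cnt / 2) step
termination_by cnt
decreasing_by all_goals omega

def sumZero_alt (n : Int) : List Int :=
  if n = 0 then [0]
  else
    let p : Int × Int × Int :=
      if PySem.Int.mod n 2 ≠ 0 then (-(PySem.Int.floordiv n 2), 1 + PySem.Int.floordiv n 2, 1)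
      else (1 - n, 1 + n, 2)
    let cnt : Int := max 0 (PySem.Int.floordiv (p.2.1 - p.1 + p.2.2 - 1) p.2.2)
    seqDC p.1 cnt.toNat p.2.2

-- ===== PRECONDITION & SPEC =====
def Spec_sumZero (n : Int) (out : List Int) : Prop := out = sumZero_alt n
instance (n : Int) (out : List Int) : Decidable (Spec_sumZero n out) := by unfold Spec_sumZero; infer_instance

-- ===== CLAIM =====
def Claim_equal_sumZero : Prop := ∀ (n : Int), Dom_sumZero n → Spec_sumZero n (sumZero n)

-- ===== LEMMAS AND PROOFS =====

theorem foldl_push (xs acc : List Int) :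
    xs.foldl (fun a i => a ++ [i]) acc = acc ++ xs := by
  induction xs generalizing acc with
  | nil => simp
  | cons x xs ih => simp [List.foldl, ih]

-- the divide-and-conquer generator produces exactly the arithmetic sequence
theorem seqDC_eq (cnt : Nat) (start step : Int) :
    seqDC start cnt step = (List.range cnt).map (fun (k : Nat) => start + step * (k : Int)) := by
  induction cnt using Nat.strong_induction_on generalizing start with
  | _ cnt ih =>
    rw [seqDC]
    by_cases h0 : cnt = 0
    · simp [h0]
    · rw [if_neg h0]
      by_cases h1 : cnt = 1
      · subst h1; simp
      · rw [if_neg h1,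
            ih (cnt / 2) (by omega) start,
            ih (cnt - cnt / 2) (by omega) _]
        have hsplit : cnt = cnt / 2 + (cnt - cnt / 2) := by omega
        rw [hsplit, List.range_add, List.map_append, List.map_map, ← hsplit]
        congr 1
        apply List.map_congr_left
        intro k _
        simp only [Function.comp_apply]
        push_cast
        ring

theorem sumZero_eq (n : Int) : sumZero n = sumZero_alt n := by
  have hmod : PySem.Int.mod n 2 = n % 2 := PySem.Int.mod_eq_emod_of_pos (by norm_num)
  have hdiv2 : ∀ a : Int, PySem.Int.floordiv a 2 = a / 2 :=
    fun a => PySem.Int.floordiv_eq_ediv_of_pos (by norm_num)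
  have hdiv1 : ∀ a : Int, PySem.Int.floordiv a 1 = a / 1 :=
    fun a => PySem.Int.floordiv_eq_ediv_of_pos (by norm_num)
  by_cases hodd : n % 2 = 0
  · by_cases h0 : n = 0
    · subst h0; rw [sumZero_alt]; decide
    · -- even, n ≠ 0
      simp only [sumZero, sumZero_alt, hmod, hdiv2, foldl_push, List.nil_append,
        if_neg (by simp [hodd] : ¬ (n % 2 ≠ 0)), if_neg h0]
      rw [PySem.List.pyRange_of_pos _ _ (by norm_num), seqDC_eq]
      congr 2
      split_ifs <;> omega
  · -- odd
    simp only [sumZero, sumZero_alt, hmod, hdiv2, hdiv1, foldl_push, List.nil_append,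
      if_pos (by simp [hodd] : (n % 2 ≠ 0)), if_neg (by omega : ¬ n = 0)]
    rw [PySem.List.pyRange_one, seqDC_eq]
    simp only [one_mul]
    rw [show (0:Int) - n/2 = -(n/2) from by ring]
    congr 2
    omega

-- ===== VERDICT =====
theorem sumZero_spec : Claim_equal_sumZero := by
  intro n _
  unfold Spec_sumZero
  exact sumZero_eq n
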